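-- pv_equiv track=rewrite | github.com/Cellier-Kerrian/NSI-Projects | Pendu/Pendu.py | genere_motifs
-- ===== SOURCE A (Python) =====
-- SYMBOLE_MYSTERE = "-"
--
-- def genere_motifs(secret,propositions):
--     '''
--
--     Parameters
--     ----------
--     mot_mystere : str
--         le mot mystere que le joueur doit trouver.
--     propositions : list
--         liste de lettre proposee par le joueur.
--
--     Returns
--     -------
--     motif : str
--         un mot qui contient un symbole pour les lettres qu'il n'a pas trouve
--         et les lettres clairement affichees pour celle qu'il a trouve.
--
--     Description
--     -------
--         genere une chaine de caractere qui represente les lettres que le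
--         joueur n'a pas encore trouvees.
--
--     '''
--     motif = ""
--     for i in range (0,len(secret)):
--         if secret[i] in propositions:
--             motif = motif+secret[i]
--         else:
--             motif = motif + SYMBOLE_MYSTERE
--     return motif
-- ===== SOURCE B (Python) =====
-- SYMBOLE_MYSTERE = "-"
--
-- def genere_motifs(secret, propositions):
--     motif = [SYMBOLE_MYSTERE] * len(secret)
--     for p in propositions:
--         for i, c in enumerate(secret):
--             if c == p:
--                 motif[i] = c
--     return "".join(motif)
-- ===== Notes on version B (the rewrite author's own statement) =====
-- stated objective: alternative
-- what changed: B pre-fills a mutable list of mystery symbols and loops over the guesses, revealing every occurrence of each guessed letter in place, instead of A's single left-to-right scan of the secret with a membership test per position.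
import Mathlib
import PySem

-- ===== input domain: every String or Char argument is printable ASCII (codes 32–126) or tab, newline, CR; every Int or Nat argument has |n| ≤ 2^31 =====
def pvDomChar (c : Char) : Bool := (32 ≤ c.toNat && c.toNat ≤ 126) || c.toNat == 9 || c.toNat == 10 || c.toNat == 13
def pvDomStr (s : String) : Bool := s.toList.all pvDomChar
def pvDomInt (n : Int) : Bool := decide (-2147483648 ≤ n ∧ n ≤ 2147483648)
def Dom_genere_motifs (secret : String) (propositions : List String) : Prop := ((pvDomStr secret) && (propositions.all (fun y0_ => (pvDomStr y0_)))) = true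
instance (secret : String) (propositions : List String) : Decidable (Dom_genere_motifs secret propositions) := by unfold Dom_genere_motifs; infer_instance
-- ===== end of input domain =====

-- B reveals letters guess-by-guess into a pre-filled symbol list instead of A's per-position membership scan; same cost, alternative decomposition.

def SYMBOLE_MYSTERE : String := "-"

-- ===== PORT A =====
-- A: scan positions 0..len-1, append the letter if it was proposed, else the mystery symbol.
def genere_motifs (secret : String) (propositions : List String) : String :=
  String.ofList ((PySem.List.pyRange 0 (PySem.Str.len secret) 1).foldl
    (fun motif i =>
      if String.singleton (PySem.List.pyGetD secret.toList i ' ') ∈ propositions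
      then motif ++ [PySem.List.pyGetD secret.toList i ' ']
      else motif ++ SYMBOLE_MYSTERE.toList) [])

-- ===== PORT B =====
-- B: pre-fill with the mystery symbol, then for each guess reveal its occurrences in place.
def genere_motifs_alt (secret : String) (propositions : List String) : String :=
  let motif0 : List Char := List.replicate secret.toList.length '-'
  String.ofList (propositions.foldl
    (fun m p =>
      (PySem.List.enumerate secret.toList 0).foldl
        (fun m ic => if String.singleton ic.2 == p then PySem.List.pySetD m ic.1 ic.2 else m) m)
    motif0)

-- ===== PRECONDITION & SPEC =====
def Spec_genere_motifs (secret : String) (propositions : List String) (out : String) : Prop := out = genere_motifs_alt secret propositions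
instance (secret : String) (propositions : List String) (out : String) : Decidable (Spec_genere_motifs secret propositions out) := by unfold Spec_genere_motifs; infer_instance

-- ===== CLAIM (what is proved, stated in full; the proofs are below) =====
def Claim_equal_genere_motifs : Prop := ∀ (secret : String) (propositions : List String), Dom_genere_motifs secret propositions → Spec_genere_motifs secret propositions (genere_motifs secret propositions)

-- ===== LEMMAS AND PROOFS =====

-- A's loop appends one character per position: it is a map over the secret's characters.
theorem pv_foldl_append_ite (props : List String) :
    ∀ (s acc : List Char),
      s.foldl (fun acc c => if String.singleton c ∈ props then acc ++ [c]
                            else acc ++ SYMBOLE_MYSTERE.toList) acc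
        = acc ++ s.map (fun c => if String.singleton c ∈ props then c else '-') := by
  intro s
  induction s with
  | nil => simp
  | cons c s ih =>
    intro acc
    simp only [List.foldl_cons, List.map_cons, ih]
    by_cases h : String.singleton c ∈ props <;> simp [h, SYMBOLE_MYSTERE]

theorem pv_A_eq_map (secret : String) (props : List String) :
    genere_motifs secret props
      = String.ofList (secret.toList.map
          (fun c => if String.singleton c ∈ props then c else '-')) := by
  unfold genere_motifs
  rw [show PySem.Str.len secret = PySem.List.len secret.toList from rfl,
      PySem.List.foldl_pyRange_zero_pyGetD
        (f := fun motif c => if String.singleton c ∈ props then motif ++ [c]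
                             else motif ++ SYMBOLE_MYSTERE.toList),
      pv_foldl_append_ite]
  simp

-- B's inner loop over enumerate with in-place updates is a zipWith over the secret.
theorem pv_inner_fold (p : String) :
    ∀ (s pre cur : List Char), cur.length = s.length →
      (PySem.List.enumerate s (pre.length : Int)).foldl
          (fun m ic => if String.singleton ic.2 == p then PySem.List.pySetD m ic.1 ic.2 else m)
          (pre ++ cur)
        = pre ++ List.zipWith (fun c mi => if String.singleton c == p then c else mi) s cur := by
  intro s
  induction s with
  | nil =>
    intro pre cur hlen
    have : cur = [] := List.eq_nil_of_length_eq_zero hlen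
    simp [this, PySem.List.enumerate]
  | cons c s ih =>
    intro pre cur hlen
    cases cur with
    | nil => simp at hlen
    | cons mi cur =>
      have hlen' : cur.length = s.length := by simpa using hlen
      rw [PySem.List.enumerate_cons]
      simp only [List.foldl_cons]
      have hset : (if String.singleton c == p
              then PySem.List.pySetD (pre ++ mi :: cur) (pre.length : Int) c
              else pre ++ mi :: cur)
            = pre ++ (if String.singleton c == p then c else mi) :: cur := by
        by_cases h : String.singleton c == p
        · simp [h, PySem.List.pySetD_natCast]
        · simp [h]
      rw [hset]
      have hcast : ((pre.length : Int) + 1) = ((pre ++ [if String.singleton c == p then c else mi]).length : Int) := by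
        simp
      have := ih (pre ++ [if String.singleton c == p then c else mi]) cur hlen'
      rw [hcast]
      simpa [List.append_assoc] using this
-- zipWith of a char test against a mapped list is a map.
theorem pv_zipWith_map (p : String) (u : Char → Char) :
    ∀ (s : List Char),
      List.zipWith (fun c mi => if String.singleton c == p then c else mi) s (s.map u)
        = s.map (fun c => if String.singleton c == p then c else u c) := by
  intro s
  induction s with
  | nil => simp
  | cons c s ih =>
    simp only [List.map_cons, List.zipWith_cons_cons, ih]

-- B's outer loop: after processing ps starting from a mapped state, the state is again a map.
theorem pv_outer_fold (s : List Char) :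
    ∀ (ps : List String) (u : Char → Char),
      ps.foldl
        (fun m p =>
          (PySem.List.enumerate s 0).foldl
            (fun m ic => if String.singleton ic.2 == p then PySem.List.pySetD m ic.1 ic.2 else m) m)
        (s.map u)
        = s.map (fun c => if ps.any (fun p => String.singleton c == p) then c else u c) := by
  intro ps
  induction ps with
  | nil => intro u; simp
  | cons p ps ih =>
    intro u
    simp only [List.foldl_cons]
    have h0 : ((List.nil (α := Char)).length : Int) = 0 := by simp
    have hin := pv_inner_fold p s [] (s.map u) (by simp)
    rw [h0] at hin
    simp only [List.nil_append] at hin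
    rw [hin, pv_zipWith_map, ih]
    apply List.map_congr_left
    intro c _
    by_cases hp : String.singleton c == p <;>
      by_cases hps : ps.any (fun q => String.singleton c == q) <;>
        simp [hp, hps]

theorem pv_B_eq_map (secret : String) (props : List String) :
    genere_motifs_alt secret props
      = String.ofList (secret.toList.map
          (fun c => if String.singleton c ∈ props then c else '-')) := by
  unfold genere_motifs_alt
  have hrep : List.replicate secret.toList.length '-' = secret.toList.map (fun _ => '-') := by
    simp
  simp only [hrep]
  rw [pv_outer_fold]
  congr 1
  apply List.map_congr_left
  intro c _
  by_cases h : String.singleton c ∈ props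
  · have hany : props.any (fun p => String.singleton c == p) = true := by
      simp only [List.any_eq_true, beq_iff_eq]
      exact ⟨_, h, rfl⟩
    simp [h, hany]
  · have hany : props.any (fun p => String.singleton c == p) = false := by
      simp only [List.any_eq_false, beq_iff_eq]
      intro p hp he
      exact h (he ▸ hp)
    simp [h, hany]

-- ===== VERDICT (by name: the statement is the Claim_ definition above) =====
theorem genere_motifs_spec : Claim_equal_genere_motifs := by
  intro secret props _
  unfold Spec_genere_motifs
  rw [pv_A_eq_map, pv_B_eq_map]
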